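-- pv_equiv track=rewrite | github.com/vindk8d/agent-tobi-rag | backend/monitoring/quotation_cleanup.py | _extract_storage_path_from_pdf_url
-- ===== SOURCE A (Python) =====
-- from typing import List, Optional
--
-- def _extract_storage_path_from_pdf_url(pdf_url: str) -> Optional[str]:
--     """
--     Extract the storage path inside the `quotations` bucket from a Supabase URL.
--
--     Supports both signed and public URLs that contain "/quotations/".
--     Returns None if path cannot be determined confidently.
--     """
--     if not pdf_url or "/quotations/" not in pdf_url:
--         return None
--
--     try:
--         # Path is everything after the first occurrence of "quotations/"
--         path = pdf_url.split("/quotations/", 1)[1]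
--         # Strip query/hash if present
--         for sep in ("?", "#"):
--             if sep in path:
--                 path = path.split(sep, 1)[0]
--         # Normalize any accidental leading slashes
--         return path.lstrip("/")
--     except Exception:
--         return None
-- ===== SOURCE B (Python) =====
-- from typing import List, Optional
--
-- def _extract_storage_path_from_pdf_url(pdf_url: str) -> Optional[str]:
--     """Single forward scan: locate the marker with str.find, then copy characters
--     until the first query/hash marker, then skip leading slashes."""
--     idx = pdf_url.find("/quotations/")
--     if idx == -1:
--         return None
--     out = []
--     for ch in pdf_url[idx + 12:]:
--         if ch == "?" or ch == "#":
--             break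
--         out.append(ch)
--     i = 0
--     while i < len(out) and out[i] == "/":
--         i += 1
--     return "".join(out[i:])
-- ===== Notes on version B (the rewrite author's own statement) =====
-- stated objective: alternative
-- what changed: Replaces the membership test + split('/quotations/',1) + per-separator split loop + lstrip with one str.find for the marker followed by a single character scan that stops at the first '?' or '#' and then skips leading slashes.
import Mathlib
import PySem

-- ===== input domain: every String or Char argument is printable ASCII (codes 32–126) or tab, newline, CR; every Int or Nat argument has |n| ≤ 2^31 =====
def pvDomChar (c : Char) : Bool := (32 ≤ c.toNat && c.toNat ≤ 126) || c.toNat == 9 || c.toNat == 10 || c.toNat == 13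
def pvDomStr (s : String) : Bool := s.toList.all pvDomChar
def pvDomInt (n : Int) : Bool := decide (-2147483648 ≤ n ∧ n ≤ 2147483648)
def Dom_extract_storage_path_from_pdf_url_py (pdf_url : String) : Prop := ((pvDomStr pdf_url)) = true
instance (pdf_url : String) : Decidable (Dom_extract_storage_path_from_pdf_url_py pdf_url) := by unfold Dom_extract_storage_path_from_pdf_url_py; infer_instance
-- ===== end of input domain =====

-- B replaces the membership-test + split + per-separator-split loop + lstrip of A by one
-- find for the marker and a single character scan (stop at '?'/'#', skip leading slashes);
-- an alternative decomposition of the same linear-time task (no speed claim).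


-- ===== PORT A =====
-- Literal port of A.  `path.lstrip("/")` is ported by hand as dropWhile on the chars of "/"
-- (exact: Python's str.lstrip(chars) removes exactly the longest prefix of characters of chars).
-- The `none` branches of the two matches mirror Python's `except Exception: return None`
-- (ValueError on an empty separator / IndexError on [1]); both are unreachable under the guard.
def extract_storage_path_from_pdf_url_py (pdf_url : String) : Option String :=
  if pdf_url.toList = [] ∨ PySem.Chars.isIn "/quotations/".toList pdf_url.toList = false then
    none
  else
    match PySem.Chars.splitMax? pdf_url.toList "/quotations/".toList 1 with
    | none => none
    | some parts =>
      match PySem.List.pyGet? parts 1 with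
      | none => none
      | some path0 =>
        let path := [['?'], ['#']].foldl (fun p sep =>
          if PySem.Chars.isIn sep p then
            (PySem.List.pyGet? ((PySem.Chars.splitMax? p sep 1).getD []) 0).getD []
          else p) path0
        some (String.ofList (path.dropWhile (fun ch => "/".toList.contains ch)))

-- ===== PORT B =====
-- the `for ch in …: if ch in "?#": break; out.append(ch)` loop of Source B
def pvTakePath : List Char → List Char
  | [] => []
  | ch :: rest => if ch == '?' || ch == '#' then [] else ch :: pvTakePath rest

-- the `while i < len(out) and out[i] == "/": i += 1; return "".join(out[i:])` loop of Source B
def pvSkipSlashes : List Char → List Char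
  | [] => []
  | ch :: rest => if ch == '/' then pvSkipSlashes rest else ch :: rest

def extract_storage_path_from_pdf_url_py_alt (pdf_url : String) : Option String :=
  let idx := PySem.Chars.find pdf_url.toList "/quotations/".toList
  if idx = -1 then none
  else some (String.ofList (pvSkipSlashes (pvTakePath (pdf_url.toList.drop (idx.toNat + 12)))))

-- ===== PRECONDITION & SPEC =====
def Spec_extract_storage_path_from_pdf_url_py (pdf_url : String) (out : Option String) : Prop := out = extract_storage_path_from_pdf_url_py_alt pdf_url
instance (pdf_url : String) (out : Option String) : Decidable (Spec_extract_storage_path_from_pdf_url_py pdf_url out) := by unfold Spec_extract_storage_path_from_pdf_url_py; infer_instance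

-- ===== CLAIM (what is proved, stated in full; the proofs are below) =====
def Claim_equal_extract_storage_path_from_pdf_url_py : Prop := ∀ (pdf_url : String), Dom_extract_storage_path_from_pdf_url_py pdf_url → Spec_extract_storage_path_from_pdf_url_py pdf_url (extract_storage_path_from_pdf_url_py pdf_url)

-- ===== LEMMAS AND PROOFS =====

-- first occurrence of sep in s: some (before, after) or none
def pvCut (sep : List Char) : List Char → Option (List Char × List Char)
  | [] => none
  | c :: rest =>
    if sep.isPrefixOf (c :: rest) then some ([], (c :: rest).drop sep.length)
    else (pvCut sep rest).map (fun p => (c :: p.1, p.2))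

theorem find_go_eq_cut (sep : List Char) (hsep : sep ≠ []) :
    ∀ (s : List Char) (k : Nat),
      PySem.Chars.find.go sep s k =
        match pvCut sep s with
        | some (b, _) => ((k : Int) + b.length)
        | none => -1 := by
  intro s
  induction s with
  | nil =>
    intro k
    rw [PySem.Chars.find.go]
    simp [pvCut, List.isEmpty_iff, hsep]
  | cons c rest ih =>
    intro k
    rw [PySem.Chars.find.go]
    by_cases h : sep.isPrefixOf (c :: rest)
    · simp [pvCut, h]
    · simp only [pvCut, h, Bool.false_eq_true, ite_false, ih (k+1)]
      cases pvCut sep rest with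
      | none => simp
      | some p => cases p with | mk b a => simp; ring

theorem cut_decomp (sep : List Char) :
    ∀ (s b a : List Char), pvCut sep s = some (b, a) → s = b ++ sep ++ a := by
  intro s
  induction s with
  | nil => intro b a h; simp [pvCut] at h
  | cons c rest ih =>
    intro b a h
    by_cases hp : sep.isPrefixOf (c :: rest)
    · simp [pvCut, hp] at h
      obtain ⟨hb, ha⟩ := h
      obtain ⟨t, ht⟩ := List.isPrefixOf_iff_prefix.mp hp
      subst hb
      simp [← ha, ← ht, List.drop_left']
    · simp [pvCut, hp] at h
      cases hc : pvCut sep rest with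
      | none => simp [hc] at h
      | some p =>
        cases p with | mk b' a' =>
        simp [hc] at h
        obtain ⟨hb, ha⟩ := h
        have := ih b' a' hc
        subst hb
        simp [← ha, this]

theorem go_eq_cut (sep : List Char) (_hsep : sep ≠ []) :
    ∀ (s : List Char) (fuel : Nat) (cur : List Char) (acc : List (List Char)),
      s.length < fuel →
      PySem.Chars.splitOnMax.go sep fuel 1 s cur acc =
        match pvCut sep s with
        | some (b, a) => (a :: (cur.reverse ++ b) :: acc).reverse
        | none => ((cur.reverse ++ s) :: acc).reverse := by
  intro s
  induction s with
  | nil =>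
    intro fuel cur acc hf
    match fuel, hf with
    | fuel + 1, _ =>
      rw [PySem.Chars.splitOnMax.go]
      · simp [pvCut]
      · omega
  | cons c rest ih =>
    intro fuel cur acc hf
    match fuel, hf with
    | fuel + 1, hf' =>
      rw [PySem.Chars.splitOnMax.go]
      by_cases hp : sep.isPrefixOf (c :: rest)
      · simp only [hp, if_true, if_neg (by omega : ¬ (1 = 0))]
        -- after the match the remaining call has maxsplit 0: it returns immediately
        have hret : ∀ (l cur' : List Char) (acc' : List (List Char)) (f : Nat),
            PySem.Chars.splitOnMax.go sep f 0 l cur' acc' = ((cur'.reverse ++ l) :: acc').reverse := by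
          intro l cur' acc' f
          match f, l with
          | 0, l => rw [PySem.Chars.splitOnMax.go]
          | f + 1, [] => rw [PySem.Chars.splitOnMax.go]; simp; omega
          | f + 1, c' :: rest' => rw [PySem.Chars.splitOnMax.go]; simp
        simp [pvCut, hp, hret]
      · simp only [hp, Bool.false_eq_true, if_false, if_neg (by omega : ¬ (1 = 0))]
        rw [ih fuel (c :: cur) acc (by simp at hf' ⊢; omega)]
        cases hc : pvCut sep rest with
        | none => simp [pvCut, hp, hc]
        | some p => cases p with | mk b a => simp [pvCut, hp, hc]

theorem takePath_eq (s : List Char) :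
    pvTakePath s =
      (s.takeWhile (fun ch => !(ch == '?'))).takeWhile (fun ch => !(ch == '#')) := by
  induction s with
  | nil => rfl
  | cons c rest ih =>
    by_cases h1 : c = '?'
    · subst h1; simp [pvTakePath]
    · by_cases h2 : c = '#'
      · subst h2; simp [pvTakePath]
      · simp [pvTakePath, h1, h2, ih]

-- A's fold step with a one-character separator is takeWhile (≠ c)
theorem cut_single_fst (c : Char) :
    ∀ p : List Char,
      (match pvCut [c] p with | some q => q.1 | none => p) =
        p.takeWhile (fun ch => !(ch == c)) := by
  intro p
  induction p with
  | nil => rfl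
  | cons d rest ih =>
    by_cases h : c = d
    · subst h; simp [pvCut, List.isPrefixOf]
    · have hp : [c].isPrefixOf (d :: rest) = false := by
        simp [List.isPrefixOf]
        exact h
      simp only [pvCut, hp, Bool.false_eq_true, if_false]
      cases hr : pvCut [c] rest with
      | none =>
        rw [hr] at ih
        simp [Ne.symm h, ← ih]
      | some q =>
        rw [hr] at ih
        simp [Ne.symm h, ← ih]

theorem astep_eq_takeWhile (c : Char) (p : List Char) :
    (if PySem.Chars.isIn [c] p then
        (PySem.List.pyGet? ((PySem.Chars.splitMax? p [c] 1).getD []) 0).getD []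
      else p) = p.takeWhile (fun ch => !(ch == c)) := by
  cases hc : pvCut [c] p with
  | none =>
    have hfind : PySem.Chars.find p [c] = -1 := by
      rw [PySem.Chars.find, find_go_eq_cut [c] (by simp) p 0, hc]
    have hin : PySem.Chars.isIn [c] p = false := by
      simp [PySem.Chars.isIn, hfind]
    rw [hin]
    have := cut_single_fst c p
    rw [hc] at this
    simpa using this
  | some q =>
    have hfind : PySem.Chars.find p [c] = (q.1.length : Int) := by
      rw [PySem.Chars.find, find_go_eq_cut [c] (by simp) p 0, hc]
      simp
    have hin : PySem.Chars.isIn [c] p = true := by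
      simp [PySem.Chars.isIn, hfind]
    rw [hin]
    have hsplit : PySem.Chars.splitMax? p [c] 1 = some [q.1, q.2] := by
      rw [PySem.Chars.splitMax?]
      simp only [List.isEmpty_cons, if_false, Bool.false_eq_true]
      rw [PySem.Chars.splitOnMax]
      rw [if_neg (by omega)]
      rw [show Int.toNat 1 = 1 from rfl]
      rw [go_eq_cut [c] (by simp) p (p.length + 1) [] [] (by omega), hc]
      simp
    rw [hsplit]
    have := cut_single_fst c p
    rw [hc] at this
    rw [← this]
    simp [PySem.List.pyGet?, PySem.List.pyIdx?]

theorem skipSlashes_eq (s : List Char) :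
    pvSkipSlashes s = s.dropWhile (fun ch => "/".toList.contains ch) := by
  induction s with
  | nil => rfl
  | cons c rest ih =>
    by_cases h : c = '/'
    · subst h; simp [pvSkipSlashes, ih]
    · simp [pvSkipSlashes, h]

-- ===== VERDICT (by name: the statement is the Claim_ definition above) =====
theorem main_eq (pdf_url : String) :
    extract_storage_path_from_pdf_url_py pdf_url = extract_storage_path_from_pdf_url_py_alt pdf_url := by
  unfold extract_storage_path_from_pdf_url_py extract_storage_path_from_pdf_url_py_alt
  have hsep : ("/quotations/".toList : List Char) ≠ [] := by decide
  have hL : ("/quotations/".toList : List Char) = ['/', 'q', 'u', 'o', 't', 'a', 't', 'i', 'o', 'n', 's', '/'] := rfl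
  cases hc : pvCut "/quotations/".toList pdf_url.toList with
  | none =>
    have hfind : PySem.Chars.find pdf_url.toList "/quotations/".toList = -1 := by
      rw [PySem.Chars.find, find_go_eq_cut _ hsep _ 0, hc]
    have hfindL : PySem.Chars.find pdf_url.toList ['/', 'q', 'u', 'o', 't', 'a', 't', 'i', 'o', 'n', 's', '/'] = -1 := by
      rw [← hL]; exact hfind
    have hinL : PySem.Chars.isIn ['/', 'q', 'u', 'o', 't', 'a', 't', 'i', 'o', 'n', 's', '/'] pdf_url.toList = false := by
      simp [PySem.Chars.isIn, hfindL]
    simp [hinL, hfindL]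
  | some q =>
    obtain ⟨b, a⟩ := q
    have hdec := cut_decomp _ _ _ _ hc
    have hfind : PySem.Chars.find pdf_url.toList "/quotations/".toList = (b.length : Int) := by
      rw [PySem.Chars.find, find_go_eq_cut _ hsep _ 0, hc]
      simp
    have hfindL : PySem.Chars.find pdf_url.toList ['/', 'q', 'u', 'o', 't', 'a', 't', 'i', 'o', 'n', 's', '/'] = (b.length : Int) := by
      rw [← hL]; exact hfind
    have hinL : PySem.Chars.isIn ['/', 'q', 'u', 'o', 't', 'a', 't', 'i', 'o', 'n', 's', '/'] pdf_url.toList = true := by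
      simp [PySem.Chars.isIn, hfindL]
    have hne : pdf_url.toList ≠ [] := by
      rw [hdec]; simp
    have hsplit : PySem.Chars.splitMax? pdf_url.toList "/quotations/".toList 1 = some [b, a] := by
      rw [PySem.Chars.splitMax?]
      rw [if_neg (by simp)]
      rw [PySem.Chars.splitOnMax]
      rw [if_neg (by omega)]
      rw [show Int.toNat 1 = 1 from rfl]
      rw [go_eq_cut _ hsep pdf_url.toList (pdf_url.toList.length + 1) [] [] (by omega), hc]
      simp
    have hdrop : pdf_url.toList.drop (((b.length : Int)).toNat + 12) = a := by
      rw [hdec]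
      rw [show ((b.length : Int)).toNat + 12 = (b ++ "/quotations/".toList).length by simp]
      exact List.drop_left
    have hfold : [['?'], ['#']].foldl (fun p sep =>
          if PySem.Chars.isIn sep p then
            (PySem.List.pyGet? ((PySem.Chars.splitMax? p sep 1).getD []) 0).getD []
          else p) a = pvTakePath a := by
      simp only [List.foldl_cons, List.foldl_nil]
      rw [astep_eq_takeWhile, astep_eq_takeWhile, takePath_eq]
    have hget : PySem.List.pyGet? ([b, a] : List (List Char)) 1 = some a := by
      simp [PySem.List.pyGet?, PySem.List.pyIdx?]
    rw [if_neg (by simp [hinL, hne]), hsplit]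
    rw [if_neg (by rw [hfind]; omega)]
    simp only [hget]
    rw [hfold, hfind, ← skipSlashes_eq]
    rw [show ((b.length : Int)).toNat + 12 = b.length + 12 from by simp] at hdrop ⊢
    rw [hdrop]

theorem extract_storage_path_from_pdf_url_py_spec : Claim_equal_extract_storage_path_from_pdf_url_py := by
  intro pdf_url _
  unfold Spec_extract_storage_path_from_pdf_url_py
  exact main_eq pdf_url
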